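-- pv_equiv track=rewrite | github.com/noelcjr/EntropyMaxima | em/code/structure.py | check_gaps
-- ===== SOURCE A (Python) =====
-- def check_gaps(data):
--     ''' The following code identify missing indexs in an monotonically
--     increasing array. Full sequence is obtained from begining of sequence
--     to the last amino acid in the sequence. Then we look for missing amino
--     acid indexes in the available structural information.
--     Ex: data=[2,3,4,5,8,9] would return inserts = [(0, 1), (5, 6), (6, 7)]
--     which provide inserts to complete the array output in
--     data2 = [1, 2, 3, 4, 5, 6, 7, 8, 9]
--     Unused.
--     '''
--     # TODO Move to utilities if this function has more genral applications
--     count = 0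
--     inserts = []
--     for i in range(1, data[-1] + 1):
--         if i not in data:
--             inserts.append((count, i))
--         count += 1
--     data2 = [i for i in data]
--     for i in inserts:
--         data2.insert(i[0], i[1])
--     return inserts
-- ===== SOURCE B (Python) =====
-- def check_gaps(data):
--     # Sort the distinct in-range values once, then walk the gaps in a single
--     # pass instead of testing membership of every every i up to the last element.
--     last = data[-1]
--     present = sorted({v for v in data if 1 <= v <= last})
--     inserts = []
--     expected = 1
--     for v in present:
--         while expected < v:
--             inserts.append((expected - 1, expected))
--             expected += 1
--         expected = v + 1
--     while expected <= last:
--         inserts.append((expected - 1, expected))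
--         expected += 1
--     return inserts
-- ===== Notes on version B (the rewrite author's own statement) =====
-- stated objective: faster
-- what changed: Replaces the scan of range(1, last+1) with an 'i in data' membership test per value by sorting the distinct in-range values once and emitting the gaps in a single forward walk with an 'expected' counter.
import Mathlib
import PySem

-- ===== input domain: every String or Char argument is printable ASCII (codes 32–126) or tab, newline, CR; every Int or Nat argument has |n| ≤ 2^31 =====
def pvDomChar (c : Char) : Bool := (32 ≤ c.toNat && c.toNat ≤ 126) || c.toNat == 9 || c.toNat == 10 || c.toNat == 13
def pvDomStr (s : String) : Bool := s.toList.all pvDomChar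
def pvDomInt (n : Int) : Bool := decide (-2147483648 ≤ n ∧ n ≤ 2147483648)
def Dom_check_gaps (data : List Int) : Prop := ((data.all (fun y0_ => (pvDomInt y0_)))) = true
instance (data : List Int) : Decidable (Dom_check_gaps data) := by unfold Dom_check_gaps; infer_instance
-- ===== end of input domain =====

-- B sorts the distinct in-range values once and walks the gaps in one forward
-- pass, instead of A's membership test 'i in data' for every i up to the last element.

-- ===== PORT A =====
-- A's trailing data2 loop is dead code (data2 is discarded, inserts is returned
-- unchanged); it is not ported.
def check_gaps (data : List Int) : List (List Int) :=
  match PySem.List.pyGet? data (-1) with   -- data[-1]; none = IndexError, excluded by Pre_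
  | none => []
  | some last =>
    let st := (PySem.List.pyRange 1 (last + 1) 1).foldl
      (fun (st : Int × List (List Int)) i =>
        (st.1 + 1, if i ∈ data then st.2 else st.2 ++ [[st.1, i]]))
      (0, [])
    st.2

-- ===== PORT B =====
-- the inner 'while expected < v: append; expected += 1' loop of Source B
def gapRun (e v : Int) : List (List Int) :=
  if h : e < v then [e - 1, e] :: gapRun (e + 1) v else []
termination_by (v - e).toNat
decreasing_by omega

def check_gaps_alt (data : List Int) : List (List Int) :=
  match PySem.List.pyGet? data (-1) with   -- last = data[-1]
  | none => []
  | some last =>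
    let present := PySem.List.sorted
      (PySem.Set.ofList (data.filter (fun v => decide (1 ≤ v) && decide (v ≤ last))))
      (fun x => x) false
    let st := present.foldl
      (fun (st : Int × List (List Int)) v => (v + 1, st.2 ++ gapRun st.1 v))
      (1, [])
    st.2 ++ gapRun st.1 (last + 1)

-- ===== PRECONDITION & SPEC =====
-- Pre_ excludes only the empty list, on which A raises IndexError when reading the last element.
def Pre_check_gaps (data : List Int) : Prop := data ≠ []
instance (data : List Int) : Decidable (Pre_check_gaps data) := by unfold Pre_check_gaps; infer_instance
def pvWitness_check_gaps : List Int := [2, 3, 4, 5, 8, 9]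

def Spec_check_gaps (data : List Int) (out : List (List Int)) : Prop := out = check_gaps_alt data
instance (data : List Int) (out : List (List Int)) : Decidable (Spec_check_gaps data out) := by unfold Spec_check_gaps; infer_instance

-- ===== CLAIM (what is proved, stated in full; the proofs are below) =====
def Claim_equal_check_gaps : Prop := ∀ (data : List Int), Dom_check_gaps data → Pre_check_gaps data → Spec_check_gaps data (check_gaps data)

-- ===== LEMMAS AND PROOFS =====

-- the common normal form both loops produce: the missing values of [1, last],
-- each paired as [i-1, i]
lemma gapRun_eq (v e : Int) :
    gapRun e v = (PySem.List.pyRange e v 1).map (fun i => [i - 1, i]) := by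
  generalize hn : (v - e).toNat = n
  induction n generalizing e with
  | zero =>
    rw [gapRun, dif_neg (by omega), PySem.List.pyRange_one_eq_nil (by omega), List.map_nil]
  | succ k ih =>
    have h : e < v := by omega
    rw [gapRun, dif_pos h, PySem.List.pyRange_one_cons h, List.map_cons, ih (e + 1) (by omega)]

-- A's loop: count is always i - 1, so the loop filters the range
lemma a_loop (data : List Int) (b : Int) :
    ∀ (a : Int) (acc : List (List Int)),
      ((PySem.List.pyRange a b 1).foldl
        (fun (st : Int × List (List Int)) i =>
          (st.1 + 1, if i ∈ data then st.2 else st.2 ++ [[st.1, i]]))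
        (a - 1, acc)).2
      = acc ++ ((PySem.List.pyRange a b 1).filter (fun i => !decide (i ∈ data))).map
          (fun i => [i - 1, i]) := by
  intro a acc
  generalize hn : (b - a).toNat = n
  induction n generalizing a acc with
  | zero =>
    rw [PySem.List.pyRange_one_eq_nil (by omega)]; simp
  | succ k ih =>
    have h : a < b := by omega
    rw [PySem.List.pyRange_one_cons h, List.foldl_cons, List.filter_cons]
    have e1 : a - 1 + 1 = a + 1 - 1 := by ring
    by_cases hm : a ∈ data
    · rw [if_pos hm, e1, ih (a + 1) acc (by omega)]
      simp [hm]
    · rw [if_neg hm, e1, ih (a + 1) _ (by omega)]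
      simp [hm]

-- B's loop: over a strictly increasing list of values in [e, last], the walk
-- emits exactly the missing values of [e, last]
lemma b_loop (last : Int) :
    ∀ (ps : List Int) (e : Int) (acc : List (List Int)),
      ps.Pairwise (· < ·) → (∀ v ∈ ps, e ≤ v) → (∀ v ∈ ps, v ≤ last) →
      (let st := ps.foldl
        (fun (st : Int × List (List Int)) v => (v + 1, st.2 ++ gapRun st.1 v)) (e, acc)
       st.2 ++ gapRun st.1 (last + 1))
      = acc ++ ((PySem.List.pyRange e (last + 1) 1).filter (fun i => !decide (i ∈ ps))).map
          (fun i => [i - 1, i]) := by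
  intro ps
  induction ps with
  | nil =>
    intro e acc _ _ _
    simp [gapRun_eq]
  | cons v t ih =>
    intro e acc hp hlo hhi
    have he : e ≤ v := hlo v (by simp)
    have hv : v ≤ last := hhi v (by simp)
    have ht : ∀ w ∈ t, v < w := by
      intro w hw; exact (List.pairwise_cons.mp hp).1 w hw
    simp only [List.foldl_cons]
    rw [ih (v + 1) (acc ++ gapRun e v) (List.pairwise_cons.mp hp).2
        (fun w hw => by have := ht w hw; omega)
        (fun w hw => hhi w (by simp [hw]))]
    rw [PySem.List.pyRange_one_append e (v + 1) (last + 1) (by omega) (by omega),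
        PySem.List.pyRange_one_succ_right he]
    rw [List.filter_append, List.filter_append, List.map_append, List.map_append]
    have h1 : (PySem.List.pyRange e v 1).filter (fun i => !decide (i ∈ v :: t))
        = PySem.List.pyRange e v 1 := by
      apply List.filter_eq_self.mpr
      intro i hi
      have hib := PySem.List.mem_pyRange_one.mp hi
      simp only [Bool.not_eq_eq_eq_not, Bool.not_true, decide_eq_false_iff_not, List.mem_cons]
      push Not
      exact ⟨by omega, fun hit => by have := ht i hit; omega⟩
    have h2 : ([v] : List Int).filter (fun i => !decide (i ∈ v :: t)) = [] := by
      simp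
    have h3 : (PySem.List.pyRange (v + 1) (last + 1) 1).filter (fun i => !decide (i ∈ v :: t))
        = (PySem.List.pyRange (v + 1) (last + 1) 1).filter (fun i => !decide (i ∈ t)) := by
      apply List.filter_congr
      intro i hi
      have hib := PySem.List.mem_pyRange_one.mp hi
      simp only [List.mem_cons]
      have : i ≠ v := by omega
      simp [this]
    rw [h1, h2, h3, gapRun_eq]
    simp [List.append_assoc]

-- membership in B's present list, for values in the scanned range
lemma mem_present (data : List Int) (last i : Int) (h1 : 1 ≤ i) (h2 : i < last + 1) :
    (i ∈ PySem.List.sorted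
      (PySem.Set.ofList (data.filter (fun v => decide (1 ≤ v) && decide (v ≤ last))))
      (fun x => x) false) ↔ i ∈ data := by
  rw [PySem.List.mem_sorted, PySem.Set.mem_ofList, List.mem_filter]
  constructor
  · exact fun ⟨h, _⟩ => h
  · intro h
    refine ⟨h, ?_⟩
    simp only [Bool.and_eq_true, decide_eq_true_eq]
    omega

-- ===== VERDICT (by name: the statement is the Claim_ definition above) =====
theorem check_gaps_spec : Claim_equal_check_gaps := by
  intro data _ hpre
  unfold Spec_check_gaps check_gaps check_gaps_alt
  have hlast : ∃ last, PySem.List.pyGet? data (-1) = some last := by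
    rw [PySem.List.pyGet?_neg_one]
    cases h : data.getLast? with
    | none => exact absurd (List.getLast?_eq_none_iff.mp h) hpre
    | some x => exact ⟨x, rfl⟩
  obtain ⟨last, hl⟩ := hlast
  rw [hl]
  simp only
  have hA := a_loop data (last + 1) 1 []
  have : ((1 : Int) - 1, ([] : List (List Int))) = (0, []) := by norm_num
  rw [this] at hA
  rw [hA]
  set present := PySem.List.sorted
      (PySem.Set.ofList (data.filter (fun v => decide (1 ≤ v) && decide (v ≤ last))))
      (fun x => x) false with hpres
  have hsorted : present.Pairwise (· < ·) := PySem.List.sorted_ofList_pairwise_lt _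
  have hlo : ∀ v ∈ present, (1 : Int) ≤ v := by
    intro v hv
    rw [hpres, PySem.List.mem_sorted, PySem.Set.mem_ofList, List.mem_filter] at hv
    simp only [Bool.and_eq_true, decide_eq_true_eq] at hv
    omega
  have hhi : ∀ v ∈ present, v ≤ last := by
    intro v hv
    rw [hpres, PySem.List.mem_sorted, PySem.Set.mem_ofList, List.mem_filter] at hv
    simp only [Bool.and_eq_true, decide_eq_true_eq] at hv
    omega
  have hB := b_loop last present 1 [] hsorted hlo hhi
  simp only at hB
  rw [hB]
  simp only [List.nil_append]
  congr 1
  apply List.filter_congr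
  intro i hi
  have hib := PySem.List.mem_pyRange_one.mp hi
  rw [hpres]
  simp [mem_present data last i hib.1 hib.2]
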